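-- pv_equiv track=rewrite | github.com/JAMM-JAMM/algorithm-study | Programmers/PS/level2/영어 끝말잇기.py | solution
-- ===== SOURCE A (Python) =====
-- def solution(n, words):
--     used_words = []
--     number, order = 0, 0
--
--     last_word = words[0][-1]
--     used_words.append(words[0])
--
--     for i in range(1, len(words)):
--         if (words[i] not in used_words) and (last_word == words[i][0]):
--             used_words.append(words[i])
--             last_word = words[i][-1]
--         else:
--             number = (i % n) + 1
--             order = (i // n) + 1
--             break
--
--     return [number, order]
-- ===== SOURCE B (Python) =====
-- def solution(n, words):
--     # pass 1: first index whose word was already seen (set-based), default len(words)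
--     seen = set()
--     r = len(words)
--     for i, w in enumerate(words):
--         if w in seen:
--             r = i
--             break
--         seen.add(w)
--     # pass 2: first chain-break index before r (no repeat can precede it)
--     f = r
--     for i in range(1, r):
--         if words[i][0] != words[i - 1][-1]:
--             f = i
--             break
--     if f == len(words):
--         return [0, 0]
--     return [f % n + 1, f // n + 1]
-- ===== Notes on version B (the rewrite author's own statement) =====
-- stated objective: alternative
-- what changed: Replaces A's single fused loop carrying used_words/last_word accumulators by two separate early-exit passes: a set-based scan for the first repeated-word index r, then a chain-break scan over indices 1..r-1, combined into the first failure index.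
import Mathlib
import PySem

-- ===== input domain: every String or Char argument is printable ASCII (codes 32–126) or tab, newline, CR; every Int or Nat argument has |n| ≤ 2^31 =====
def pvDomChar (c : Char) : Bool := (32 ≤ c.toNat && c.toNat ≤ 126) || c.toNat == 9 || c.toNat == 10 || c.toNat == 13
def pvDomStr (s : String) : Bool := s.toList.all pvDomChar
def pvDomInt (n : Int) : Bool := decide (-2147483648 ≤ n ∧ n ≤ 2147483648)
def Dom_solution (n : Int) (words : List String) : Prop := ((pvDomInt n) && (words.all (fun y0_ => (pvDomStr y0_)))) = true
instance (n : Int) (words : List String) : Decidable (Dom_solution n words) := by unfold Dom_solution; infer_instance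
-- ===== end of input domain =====

-- B replaces A's fused break-on-first-failure loop by two separate early-exit passes (a
-- set-based first-repeat scan, then a chain-break scan bounded by it); alternative decomposition.


-- ===== PORT A =====
-- for i in range(1, len(words)): either extend (used_words, last_word) or break with the answer
def solutionLoopA (n : Int) (i : Nat) (used : List String) (last : Char) : List String → List Int
  | [] => [0, 0]
  | w :: rest =>
    if used.contains w = false ∧ PySem.Str.pyGet? w 0 = some last then
      match PySem.Str.pyGet? w (-1) with
      | some c => solutionLoopA n (i + 1) (used ++ [w]) c rest
      | none => [0, 0]   -- unreachable: w[0] exists, hence w ≠ "" and w[-1] exists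
    else
      [PySem.Int.mod (i : Int) n + 1, PySem.Int.floordiv (i : Int) n + 1]

def solution (n : Int) (words : List String) : List Int :=
  match words with
  | [] => [0, 0]          -- Python raises IndexError here (outside Pre_)
  | w0 :: rest =>
    match PySem.Str.pyGet? w0 (-1) with
    | none => [0, 0]      -- Python raises IndexError here (outside Pre_)
    | some last => solutionLoopA n 1 [w0] last rest

-- ===== PORT B =====
-- the two failure conditions of the word-chain game, as conditions on the input alone
-- (shared by port B and by Pre_ below; they reference neither port)
def failRep (words : List String) (i : Int) : Bool :=
  decide (PySem.List.pyGetD words i "" ∈ words.take i.toNat)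
def failBrk (words : List String) (i : Int) : Bool :=
  PySem.Str.pyGet? (PySem.List.pyGetD words i "") 0
    != PySem.Str.pyGet? (PySem.List.pyGetD words (i - 1) "") (-1)
def failAt (words : List String) (i : Int) : Bool := failRep words i || failBrk words i

-- pass 1: first index whose word is already in the seen set, default dflt = len(words)
def repLoopB : List String → PySem.Set String → Int → Int → Int
  | [], _, _, r => r
  | w :: rest, seen, i, r =>
    if PySem.Set.contains seen w then i
    else repLoopB rest (PySem.Set.add seen w) (i + 1) r

-- pass 2: for i in range(1, r): first i with words[i][0] != words[i-1][-1], default f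
def brkLoopB (words : List String) : List Int → Int → Int
  | [], f => f
  | i :: rest, f =>
    if failBrk words i then i
    else brkLoopB words rest f

def solution_alt (n : Int) (words : List String) : List Int :=
  let r := repLoopB words PySem.Set.empty 0 (words.length : Int)
  let f := brkLoopB words (PySem.List.pyRange 1 r) r
  if f = (words.length : Int) then [0, 0]
  else [PySem.Int.mod f n + 1, PySem.Int.floordiv f n + 1]

-- ===== PRECONDITION & SPEC =====
-- no failure at any index j with 1 <= j < k
def noEarlyFail (words : List String) (k : Nat) : Bool :=
  (List.range k).all (fun j => decide (j = 0) || !failAt words (j : Int))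

-- Pre_ is exactly the set of inputs on which Python A returns normally: a nonempty list with a
-- nonempty first word, such that at the first failure index (if any) the failing word is a
-- repeat or nonempty (else A's words[i][0] raises IndexError) and n ≠ 0 (else i % n raises
-- ZeroDivisionError); it excludes nothing on which A returns.
def Pre_solution (n : Int) (words : List String) : Prop :=
  words ≠ [] ∧ PySem.List.pyGetD words 0 "" ≠ "" ∧
  ∀ k : Nat, k < words.length →
    (1 ≤ k ∧ noEarlyFail words k = true ∧ failAt words (k : Int) = true) →
    (n ≠ 0 ∧ (failRep words (k : Int) = true ∨ PySem.List.pyGetD words (k : Int) "" ≠ ""))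
instance (n : Int) (words : List String) : Decidable (Pre_solution n words) := by
  unfold Pre_solution; infer_instance

def pvWitness_solution : Int × List String := (2, ["ab", "bc", "ca"])

def Spec_solution (n : Int) (words : List String) (out : List Int) : Prop := out = solution_alt n words
instance (n : Int) (words : List String) (out : List Int) : Decidable (Spec_solution n words out) := by unfold Spec_solution; infer_instance

-- ===== CLAIM (what is proved, stated in full; the proofs are below) =====
def Claim_equal_solution : Prop := ∀ (n : Int) (words : List String), Dom_solution n words → Pre_solution n words → Spec_solution n words (solution n words)

-- ===== LEMMAS AND PROOFS =====

-- shared output shape: [0,0] on no failure, position of the first failing index otherwise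
def outOf (n : Int) : Option Int → List Int
  | none => [0, 0]
  | some i => [PySem.Int.mod i n + 1, PySem.Int.floordiv i n + 1]

lemma find?_congr_mem {l : List Int} {p q : Int → Bool} (h : ∀ a ∈ l, p a = q a) :
    l.find? p = l.find? q := by
  induction l with
  | nil => rfl
  | cons x t ih =>
    simp only [List.find?_cons, h x (by simp)]
    split
    · rfl
    · exact ih (fun a ha => h a (by simp [ha]))

lemma set_ofList_append_singleton (pre : List String) (w : String) :
    PySem.Set.ofList (pre ++ [w]) = PySem.Set.add (PySem.Set.ofList pre) w := by
  simp [PySem.Set.ofList_eq_foldl, List.foldl_append]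

lemma set_contains_ofList (pre : List String) (w : String) :
    PySem.Set.contains (PySem.Set.ofList pre) w = decide (w ∈ pre) := by
  by_cases h : w ∈ pre <;> simp [h, PySem.Set.mem_ofList]

-- element access at a Nat index written through pyGetD, on a split list
lemma pyGetD_append_cons (pre : List String) (w : String) (suf : List String) :
    PySem.List.pyGetD (pre ++ w :: suf) (pre.length : Int) "" = w := by
  simp [pysem]

-- a nonempty word has a last character
lemma lastChar_of_ne_empty (w : String) (h : w ≠ "") :
    ∃ c, PySem.Str.pyGet? w (-1) = some c := by
  have h1 : PySem.Str.pyGet? w (-1) = w.toList.getLast? := by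
    simp [PySem.Str.pyGet?, PySem.List.pyGet?_neg_one]
  have h2 : w.toList ≠ [] := by simpa [String.toList_eq_nil_iff] using h
  rw [h1]
  exact List.getLast?_isSome.mpr h2 |> Option.isSome_iff_exists.mp

lemma firstChar_some_ne_empty {w : String} {c : Char} (h : PySem.Str.pyGet? w 0 = some c) :
    w ≠ "" := by
  intro hw; subst hw; simp [PySem.Str.pyGet?, PySem.List.pyGet?] at h

-- A's fused loop, characterised by the first index failing either test
lemma loopA_eq (n : Int) (words : List String) :
    ∀ (suf pre : List String) (lw : String) (c : Char),
      words = pre ++ suf → pre.getLast? = some lw → PySem.Str.pyGet? lw (-1) = some c →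
      solutionLoopA n pre.length pre c suf
        = outOf n ((PySem.List.pyRange (pre.length : Int) (words.length : Int)).find?
            (failAt words)) := by
  intro suf
  induction suf with
  | nil =>
    intro pre lw c hw _ _
    have : PySem.List.pyRange (pre.length : Int) (words.length : Int) = [] := by
      rw [hw]
      simp [PySem.List.pyRange]
    rw [this]
    rfl
  | cons w rest ih =>
    intro pre lw c hw hlast hlc
    have hlt : (pre.length : Int) < (words.length : Int) := by
      rw [hw]; simp
    rw [PySem.List.pyRange_one_cons hlt]
    simp only [List.find?_cons]
    have hrep : failRep words (pre.length : Int) = decide (w ∈ pre) := by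
      unfold failRep
      rw [hw, pyGetD_append_cons]
      simp [List.take_left']
    have hprev : PySem.List.pyGetD words ((pre.length : Int) - 1) "" = lw := by
      rcases List.getLast?_eq_some_iff.mp hlast with ⟨pre', hpre⟩
      have : ((pre.length : Int) - 1) = (pre'.length : Int) := by
        rw [hpre]; simp
      rw [this, hw, hpre]
      have : (pre' ++ [lw]) ++ w :: rest = pre' ++ lw :: (w :: rest) := by simp
      rw [this, pyGetD_append_cons]
    have hbrk : failBrk words (pre.length : Int)
        = (PySem.Str.pyGet? w 0 != some c) := by
      unfold failBrk
      rw [hw, pyGetD_append_cons, ← hw, hprev, hlc]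
    by_cases hF : failAt words (pre.length : Int) = true
    · -- failure here: A breaks, find? stops
      simp only [hF]
      have hcond : ¬ (pre.contains w = false ∧ PySem.Str.pyGet? w 0 = some c) := by
        rintro ⟨hc1, hc2⟩
        unfold failAt at hF
        rcases Bool.or_eq_true_iff.mp hF with h | h
        · rw [hrep] at h
          simp at h
          simp [h] at hc1
        · rw [hbrk, hc2] at h
          simp at h
      rw [solutionLoopA, if_neg hcond]
      rfl
    · -- no failure here: A extends its state, find? moves on
      have hF' : failAt words (pre.length : Int) = false := by
        simpa using hF
      simp only [hF']
      have hF2 : (failRep words (pre.length : Int) || failBrk words (pre.length : Int)) = false := hF'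
      have hnrep : w ∈ pre → False := by
        intro h
        apply hF
        unfold failAt
        rw [hrep]
        simp [h]
      have hnbrk : PySem.Str.pyGet? w 0 = some c := by
        by_contra h
        have hb : failBrk words (pre.length : Int) = true := by
          rw [hbrk]; exact bne_iff_ne.mpr h
        simp [hb] at hF2
      have hcond : pre.contains w = false ∧ PySem.Str.pyGet? w 0 = some c := by
        constructor
        · simp only [List.contains_eq_mem, decide_eq_false_iff_not]
          exact hnrep
        · exact hnbrk
      rw [solutionLoopA, if_pos hcond]
      rcases lastChar_of_ne_empty w (firstChar_some_ne_empty hnbrk) with ⟨c', hc'⟩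
      rw [hc']
      have ihh := ih (pre ++ [w]) w c' (by simp [hw]) (by simp) hc'
      rw [List.length_append] at ihh
      have hlen1 : ((pre.length + 1 : Nat) : Int) = (pre.length : Int) + 1 := by push_cast; ring
      simpa [hlen1] using ihh

-- B's first pass, characterised by the first repeating index
lemma repLoopB_eq (words : List String) :
    ∀ (suf pre : List String), words = pre ++ suf →
      repLoopB suf (PySem.Set.ofList pre) (pre.length : Int) (words.length : Int)
        = ((PySem.List.pyRange (pre.length : Int) (words.length : Int)).find?
            (failRep words)).getD (words.length : Int) := by
  intro suf
  induction suf with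
  | nil =>
    intro pre hw
    have : PySem.List.pyRange (pre.length : Int) (words.length : Int) = [] := by
      rw [hw]
      simp [PySem.List.pyRange]
    rw [this]
    rfl
  | cons w rest ih =>
    intro pre hw
    have hlt : (pre.length : Int) < (words.length : Int) := by
      rw [hw]; simp
    rw [PySem.List.pyRange_one_cons hlt]
    simp only [List.find?_cons]
    have hrep : failRep words (pre.length : Int) = decide (w ∈ pre) := by
      unfold failRep
      rw [hw, pyGetD_append_cons]
      simp [List.take_left']
    rw [hrep]
    have hstep : repLoopB (w :: rest) (PySem.Set.ofList pre) (pre.length : Int) (words.length : Int)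
        = if decide (w ∈ pre) = true then (pre.length : Int)
          else repLoopB rest (PySem.Set.ofList (pre ++ [w])) ((pre.length : Int) + 1) (words.length : Int) := by
      rw [repLoopB, set_contains_ofList, set_ofList_append_singleton]
    rw [hstep]
    by_cases h : w ∈ pre
    · simp [h]
    · have ihh := ih (pre ++ [w]) (by simp [hw])
      have hlen : ((pre ++ [w]).length : Int) = (pre.length : Int) + 1 := by simp
      rw [hlen] at ihh
      simp [h, ihh]

-- B's second pass is a find? with default
lemma brkLoopB_eq (words : List String) (l : List Int) (f : Int) :
    brkLoopB words l f = (l.find? (failBrk words)).getD f := by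
  induction l with
  | nil => rfl
  | cons i rest ih =>
    rw [brkLoopB, List.find?_cons]
    by_cases h : failBrk words i = true
    · simp [h]
    · simp [h, ih]

-- B, characterised by the same first failing index
lemma solution_alt_eq (n : Int) (words : List String) (hw : words ≠ []) :
    solution_alt n words
      = outOf n ((PySem.List.pyRange 1 (words.length : Int)).find? (failAt words)) := by
  have hlen : 0 < words.length := List.length_pos_iff.mpr hw
  have hlenI : (0 : Int) < (words.length : Int) := by exact_mod_cast hlen
  -- the first pass
  have hr0 := repLoopB_eq words words [] rfl
  simp only [List.length_nil, Nat.cast_zero] at hr0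
  have hempty : PySem.Set.ofList ([] : List String) = PySem.Set.empty := rfl
  rw [hempty] at hr0
  have hcons : PySem.List.pyRange 0 (words.length : Int)
      = (0 : Int) :: PySem.List.pyRange 1 (words.length : Int) :=
    PySem.List.pyRange_one_cons hlenI
  have hrep0 : failRep words 0 = false := by
    unfold failRep
    simp [Int.toNat_zero]
  rw [hcons, List.find?_cons, hrep0] at hr0
  simp only [] at hr0
  -- abbreviations
  set L : Int := (words.length : Int) with hL
  set R := (PySem.List.pyRange 1 L).find? (failRep words) with hR
  unfold solution_alt
  simp only [← hL, hr0, brkLoopB_eq]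
  cases hRc : R with
  | none =>
    -- no repeat anywhere: r = len, combined failure = first break
    have hallrep : ∀ a ∈ PySem.List.pyRange 1 L, failRep words a = false := by
      intro a ha
      simpa using List.find?_eq_none.mp (hR ▸ hRc) a ha
    have hcongr : (PySem.List.pyRange 1 L).find? (failAt words)
        = (PySem.List.pyRange 1 L).find? (failBrk words) := by
      apply find?_congr_mem
      intro a ha
      unfold failAt
      rw [hallrep a ha]
      simp
    simp only [Option.getD_none]
    rw [hcongr]
    cases hB : (PySem.List.pyRange 1 L).find? (failBrk words) with
    | none => simp [outOf]
    | some b =>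
      have hbmem := List.mem_of_find?_eq_some hB
      have hblt : b < L := (PySem.List.mem_pyRange_one.mp hbmem).2
      simp only [Option.getD_some]
      rw [if_neg (by omega)]
      rfl
  | some r0 =>
    have hr0mem := List.mem_of_find?_eq_some (hR ▸ hRc)
    have hr0b := PySem.List.mem_pyRange_one.mp hr0mem
    have hsplit : PySem.List.pyRange 1 L
        = PySem.List.pyRange 1 r0 ++ PySem.List.pyRange r0 L :=
      PySem.List.pyRange_one_append 1 r0 L hr0b.1 (le_of_lt hr0b.2)
    -- failRep is false strictly before r0
    have hnone1 : (PySem.List.pyRange 1 r0).find? (failRep words) = none := by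
      cases hx : (PySem.List.pyRange 1 r0).find? (failRep words) with
      | none => rfl
      | some x =>
        have hxmem := List.mem_of_find?_eq_some hx
        have hxlt : x < r0 := (PySem.List.mem_pyRange_one.mp hxmem).2
        have hcontra : R = some x := by
          rw [hR, hsplit, List.find?_append, hx]
          rfl
        rw [hRc] at hcontra
        injection hcontra with hxr
        omega
    have hpre_false : ∀ a ∈ PySem.List.pyRange 1 r0, failRep words a = false := by
      intro a ha
      simpa using List.find?_eq_none.mp hnone1 a ha
    have hcongr : (PySem.List.pyRange 1 r0).find? (failAt words)
        = (PySem.List.pyRange 1 r0).find? (failBrk words) := by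
      apply find?_congr_mem
      intro a ha
      unfold failAt
      rw [hpre_false a ha]
      simp
    simp only [Option.getD_some]
    cases hB : (PySem.List.pyRange 1 r0).find? (failBrk words) with
    | none =>
      -- no break before r0: first combined failure is r0 (a repeat)
      have hrepr0 : failRep words r0 = true := List.find?_some (hR ▸ hRc)
      have hfind : (PySem.List.pyRange 1 L).find? (failAt words) = some r0 := by
        rw [hsplit, List.find?_append, hcongr, hB]
        have hcons2 : PySem.List.pyRange r0 L = r0 :: PySem.List.pyRange (r0 + 1) L :=
          PySem.List.pyRange_one_cons hr0b.2
        rw [hcons2, List.find?_cons]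
        have hA : failAt words r0 = true := by unfold failAt; rw [hrepr0]; simp
        simp [hA]
      rw [hfind]
      simp only [Option.getD_none]
      rw [if_neg (by omega)]
      rfl
    | some b =>
      -- break at b < r0: first combined failure is b
      have hbmem := List.mem_of_find?_eq_some hB
      have hbb := PySem.List.mem_pyRange_one.mp hbmem
      have hfind : (PySem.List.pyRange 1 L).find? (failAt words) = some b := by
        rw [hsplit, List.find?_append, hcongr, hB]
        rfl
      rw [hfind]
      simp only [Option.getD_some]
      rw [if_neg (by omega)]
      rfl

-- ===== VERDICT (by name: the statement is the Claim_ definition above) =====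
theorem solution_spec : Claim_equal_solution := by
  intro n words _ hpre
  rcases hpre with ⟨hne, hhead, _⟩
  unfold Spec_solution
  match hwords : words with
  | [] => exact absurd rfl hne
  | w0 :: rest =>
    have hw0 : w0 ≠ "" := by
      simpa [PySem.List.pyGetD] using hhead
    rcases lastChar_of_ne_empty w0 hw0 with ⟨c, hc⟩
    have hA : solution n (w0 :: rest) = solutionLoopA n 1 [w0] c rest := by
      rw [solution, hc]
    have hloop := loopA_eq n (w0 :: rest) rest [w0] w0 c rfl (by simp) hc
    simp only [List.length_cons, List.length_nil] at hloop
    rw [hA, hloop, solution_alt_eq n (w0 :: rest) (by simp)]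
    norm_num
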